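-- pv_equiv track=rewrite | github.com/sanger-pathogens/multimapper | py3_scripts/summarise_snps_py3.py | countcodonchanges
-- ===== SOURCE A (Python) =====
-- def countcodonchanges(codon, SNPcodon, geneticcode, sd, nd, loopsd=0, loopnd=0, pathcount=0):
--     for x in range(3):
--         if codon[x] != SNPcodon[x]:
--             newSNPcodon = SNPcodon[:x] + codon[x] + SNPcodon[x + 1:]
--
--             # print  SNPcodon, newSNPcodon, geneticcode[SNPcodon], geneticcode[newSNPcodon]
--
--             if geneticcode[newSNPcodon] == '*':
--                 continue
--             elif geneticcode[SNPcodon] == geneticcode[newSNPcodon]: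
--                 newloopnd = loopnd
--                 newloopsd = loopsd + 1
--             else:
--                 newloopnd = loopnd + 1
--                 newloopsd = loopsd
--
--             # print SNPcodon, newSNPcodon, codon, sd, nd, newloopsd, newloopnd, pathcount
--             if newSNPcodon != codon:
--                 sd, nd, pathcount = countcodonchanges(codon, newSNPcodon, geneticcode, sd, nd, newloopsd, newloopnd,
--                                                       pathcount)
--
--             else:
--                 sd = sd + newloopsd
--                 nd = nd + newloopnd
--                 pathcount = pathcount + 1
--
--     return sd, nd, pathcount
-- ===== SOURCE B (Python) =====
-- from itertools import permutations
--
--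
-- def countcodonchanges(codon, SNPcodon, geneticcode, sd, nd, loopsd=0, loopnd=0, pathcount=0):
--     diffs = [x for x in range(3) if codon[x] != SNPcodon[x]]
--     if not diffs:
--         return sd, nd, pathcount
--     for order in permutations(diffs):
--         cur = SNPcodon
--         syn, non = loopsd, loopnd
--         ok = True
--         for x in order:
--             nxt = cur[:x] + codon[x] + cur[x + 1:]
--             if geneticcode[nxt] == '*':
--                 ok = False
--                 break
--             if geneticcode[cur] == geneticcode[nxt]:
--                 syn += 1
--             else:
--                 non += 1
--             cur = nxt
--         if ok and cur == codon:
--             sd += syn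
--             nd += non
--             pathcount += 1
--     return sd, nd, pathcount
-- ===== Notes on version B (the rewrite author's own statement) =====
-- stated objective: alternative
-- what changed: A explores mutation orders by depth-first recursion that rescans range(3) and prunes whole subtrees at stop codons; B computes the differing positions once and iterates itertools.permutations of them, scoring each complete mutation order independently.
import Mathlib
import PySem

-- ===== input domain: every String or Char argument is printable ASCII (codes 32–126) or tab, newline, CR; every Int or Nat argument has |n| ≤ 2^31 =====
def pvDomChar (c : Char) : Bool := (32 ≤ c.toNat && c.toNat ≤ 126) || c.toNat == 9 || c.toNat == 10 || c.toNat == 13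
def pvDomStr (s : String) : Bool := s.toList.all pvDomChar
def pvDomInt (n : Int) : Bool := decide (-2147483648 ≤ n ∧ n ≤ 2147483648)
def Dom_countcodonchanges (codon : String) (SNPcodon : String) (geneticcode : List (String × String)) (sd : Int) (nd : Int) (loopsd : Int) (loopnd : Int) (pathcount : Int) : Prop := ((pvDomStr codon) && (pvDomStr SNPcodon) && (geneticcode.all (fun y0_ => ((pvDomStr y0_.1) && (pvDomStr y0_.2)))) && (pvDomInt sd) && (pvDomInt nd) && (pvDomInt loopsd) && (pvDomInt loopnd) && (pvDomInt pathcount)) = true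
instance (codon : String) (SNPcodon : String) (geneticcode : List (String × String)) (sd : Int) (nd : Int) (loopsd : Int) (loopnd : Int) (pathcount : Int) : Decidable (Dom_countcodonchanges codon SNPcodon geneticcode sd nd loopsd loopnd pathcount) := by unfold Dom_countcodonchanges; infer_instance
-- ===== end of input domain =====

-- B replaces A's depth-first recursion by a flat enumeration of the permutations of the differing
-- positions, scoring each mutation order independently ('alternative' objective, no speed claim).

-- Shared primitive helpers (both Pythons index/slice strings and read the codon dict identically).
-- Python s[x] for 0 ≤ x < len(s); out-of-range raises IndexError and is excluded by Pre_.
def pvAt (l : List Char) (x : Nat) : Char := l.getD x ' '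
-- Python s[:x] + c + s[x+1:] for 0 ≤ x (exact: nonnegative slice bounds are take/drop).
def pvSub (l : List Char) (x : Nat) (c : Char) : List Char := l.take x ++ c :: l.drop (x + 1)
-- Python geneticcode[k]; a missing key raises KeyError and is excluded by Pre_.
def pvLook (gc : PySem.Dict String String) (k : List Char) : String := gc.getD (String.mk k) ""
-- The positions x in range(3) where codon[x] != cur[x] (the filter both Pythons write).
def pvD (codon cur : List Char) : List Nat := (List.range 3).filter (fun x => pvAt codon x ≠ pvAt cur x)

-- ===== PORT A =====
-- A's body: 'for x in range(3)' threading (sd, nd, pathcount); xs is the not-yet-visited part of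
-- range(3).  The dite guard only justifies termination; under Pre_ (3 ≤ |cur|) it always holds.
def countA (codon : List Char) (gc : PySem.Dict String String) (cur : List Char) (xs : List Nat)
    (sd nd ls ln pc : Int) : Int × Int × Int :=
  match xs with
  | [] => (sd, nd, pc)
  | x :: rest =>
    if pvAt codon x ≠ pvAt cur x then
      let nw := pvSub cur x (pvAt codon x)
      if pvLook gc nw = "*" then
        countA codon gc cur rest sd nd ls ln pc
      else
        let p := if pvLook gc cur = pvLook gc nw then (ls + 1, ln) else (ls, ln + 1)
        if nw ≠ codon then
          if _h : (pvD codon nw).length < (pvD codon cur).length then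
            let r := countA codon gc nw [0, 1, 2] sd nd p.1 p.2 pc
            countA codon gc cur rest r.1 r.2.1 ls ln r.2.2
          else (sd, nd, pc)
        else
          countA codon gc cur rest (sd + p.1) (nd + p.2) ls ln (pc + 1)
    else countA codon gc cur rest sd nd ls ln pc
termination_by ((pvD codon cur).length, xs.length)

def countcodonchanges (codon : String) (SNPcodon : String) (geneticcode : List (String × String)) (sd : Int) (nd : Int) (loopsd : Int) (loopnd : Int) (pathcount : Int) : Int × Int × Int :=
  countA codon.toList (PySem.Dict.ofList geneticcode) SNPcodon.toList [0, 1, 2] sd nd loopsd loopnd pathcount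

-- ===== PORT B =====
-- B's inner 'for x in order' loop: apply the changes in the given order, none = the broken-out
-- ('ok = False') case at a stop codon, some = the final codon with the local syn/nonsyn counts.
def pvRunB (codon : List Char) (gc : PySem.Dict String String) (cur : List Char) (order : List Nat)
    (syn non : Int) : Option (List Char × Int × Int) :=
  match order with
  | [] => some (cur, syn, non)
  | x :: rest =>
    let nxt := pvSub cur x (pvAt codon x)
    if pvLook gc nxt = "*" then none
    else if pvLook gc cur = pvLook gc nxt then pvRunB codon gc nxt rest (syn + 1) non
    else pvRunB codon gc nxt rest syn (non + 1)

-- B's per-ordering accumulation ('if ok and cur == codon: sd += syn; nd += non; pathcount += 1').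
def pvStepB (codon : List Char) (gc : PySem.Dict String String) (cur : List Char) (ls ln : Int)
    (acc : Int × Int × Int) (order : List Nat) : Int × Int × Int :=
  match pvRunB codon gc cur order ls ln with
  | none => acc
  | some (fin, syn, non) => if fin = codon then (acc.1 + syn, acc.2.1 + non, acc.2.2 + 1) else acc

-- itertools.permutations(diffs) is PySem.List.permutations diffs diffs.length.
def countcodonchanges_alt (codon : String) (SNPcodon : String) (geneticcode : List (String × String)) (sd : Int) (nd : Int) (loopsd : Int) (loopnd : Int) (pathcount : Int) : Int × Int × Int :=
  let c := codon.toList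
  let s := SNPcodon.toList
  let d := PySem.Dict.ofList geneticcode
  let ds := pvD c s
  if ds = [] then (sd, nd, pathcount)
  else (PySem.List.permutations ds ds.length).foldl (pvStepB c d s loopsd loopnd) (sd, nd, pathcount)

-- ===== PRECONDITION & SPEC =====
-- The codon after applying the changes at positions xs (in that order) to s.
def pvNode (codon s : List Char) (xs : List Nat) : List Char :=
  xs.foldl (fun c x => pvSub c x (pvAt codon x)) s

-- Exactly the inputs on which Python A returns normally: both strings have an index 0..2
-- (else IndexError), and every dict lookup A performs finds its key (else KeyError): along any
-- order of the differing positions whose intermediate codons are all present and stop-free, the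
-- next intermediate codon must be a key, and when it is not a stop codon the current codon must
-- be a key too.
def Pre_countcodonchanges (codon : String) (SNPcodon : String) (geneticcode : List (String × String)) (sd : Int) (nd : Int) (loopsd : Int) (loopnd : Int) (pathcount : Int) : Prop :=
  3 ≤ codon.toList.length ∧ 3 ≤ SNPcodon.toList.length ∧
    ∀ σ ∈ PySem.List.permutations (pvD codon.toList SNPcodon.toList)
        (pvD codon.toList SNPcodon.toList).length,
      ∀ k ∈ List.range σ.length,
        (∀ j ∈ List.range k,
            (PySem.Dict.ofList geneticcode).contains
              (String.mk (pvNode codon.toList SNPcodon.toList (σ.take (j + 1)))) = true ∧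
            pvLook (PySem.Dict.ofList geneticcode)
              (pvNode codon.toList SNPcodon.toList (σ.take (j + 1))) ≠ "*") →
        ((PySem.Dict.ofList geneticcode).contains
            (String.mk (pvNode codon.toList SNPcodon.toList (σ.take (k + 1)))) = true ∧
          (pvLook (PySem.Dict.ofList geneticcode)
              (pvNode codon.toList SNPcodon.toList (σ.take (k + 1))) ≠ "*" →
            (PySem.Dict.ofList geneticcode).contains
              (String.mk (pvNode codon.toList SNPcodon.toList (σ.take k))) = true))
instance (codon : String) (SNPcodon : String) (geneticcode : List (String × String)) (sd : Int) (nd : Int) (loopsd : Int) (loopnd : Int) (pathcount : Int) : Decidable (Pre_countcodonchanges codon SNPcodon geneticcode sd nd loopsd loopnd pathcount) := by unfold Pre_countcodonchanges; infer_instance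

def pvWitness_countcodonchanges : String × String × (List (String × String)) × Int × Int × Int × Int × Int :=
  ("ACA", "AAA", [("AAA", "K"), ("ACA", "T"), ("AAT", "N")], 1, 2, 0, 0, 0)

def Spec_countcodonchanges (codon : String) (SNPcodon : String) (geneticcode : List (String × String)) (sd : Int) (nd : Int) (loopsd : Int) (loopnd : Int) (pathcount : Int) (out : Int × Int × Int) : Prop := out = countcodonchanges_alt codon SNPcodon geneticcode sd nd loopsd loopnd pathcount
instance (codon : String) (SNPcodon : String) (geneticcode : List (String × String)) (sd : Int) (nd : Int) (loopsd : Int) (loopnd : Int) (pathcount : Int) (out : Int × Int × Int) : Decidable (Spec_countcodonchanges codon SNPcodon geneticcode sd nd loopsd loopnd pathcount out) := by unfold Spec_countcodonchanges; infer_instance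

-- ===== CLAIM (what is proved, stated in full; the proofs are below) =====
def Claim_equal_countcodonchanges : Prop := ∀ (codon : String) (SNPcodon : String) (geneticcode : List (String × String)) (sd : Int) (nd : Int) (loopsd : Int) (loopnd : Int) (pathcount : Int), Dom_countcodonchanges codon SNPcodon geneticcode sd nd loopsd loopnd pathcount → Pre_countcodonchanges codon SNPcodon geneticcode sd nd loopsd loopnd pathcount → Spec_countcodonchanges codon SNPcodon geneticcode sd nd loopsd loopnd pathcount (countcodonchanges codon SNPcodon geneticcode sd nd loopsd loopnd pathcount)

-- ===== LEMMAS AND PROOFS =====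

theorem pvWitness_ok :
    Dom_countcodonchanges (pvWitness_countcodonchanges.1) (pvWitness_countcodonchanges.2.1) (pvWitness_countcodonchanges.2.2.1) (pvWitness_countcodonchanges.2.2.2.1) (pvWitness_countcodonchanges.2.2.2.2.1) (pvWitness_countcodonchanges.2.2.2.2.2.1) (pvWitness_countcodonchanges.2.2.2.2.2.2.1) (pvWitness_countcodonchanges.2.2.2.2.2.2.2) ∧
    Pre_countcodonchanges (pvWitness_countcodonchanges.1) (pvWitness_countcodonchanges.2.1) (pvWitness_countcodonchanges.2.2.1) (pvWitness_countcodonchanges.2.2.2.1) (pvWitness_countcodonchanges.2.2.2.2.1) (pvWitness_countcodonchanges.2.2.2.2.2.1) (pvWitness_countcodonchanges.2.2.2.2.2.2.1) (pvWitness_countcodonchanges.2.2.2.2.2.2.2) := by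
  decide

theorem pvD_self (codon : List Char) : pvD codon codon = [] := by
  simp [pvD]

theorem mem_pvD {codon cur : List Char} {x : Nat} :
    x ∈ pvD codon cur ↔ x < 3 ∧ pvAt codon x ≠ pvAt cur x := by
  simp [pvD, List.mem_filter, List.mem_range, and_comm]

theorem nodup_pvD (codon cur : List Char) : (pvD codon cur).Nodup :=
  List.Nodup.filter _ (List.nodup_range)

theorem pvSub_length {l : List Char} {x : Nat} (c : Char) (hx : x < l.length) :
    (pvSub l x c).length = l.length := by
  simp [pvSub]; omega

theorem pvD_sub {codon cur : List Char} {x : Nat} (hx : x < 3) (hlen : 3 ≤ cur.length)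
    (hd : pvAt codon x ≠ pvAt cur x) :
    pvD codon (pvSub cur x (pvAt codon x)) = (pvD codon cur).erase x := by
  obtain ⟨a, cur, _⟩ : ∃ a t, cur = a :: t := by
    cases cur with | nil => simp at hlen | cons a t => exact ⟨a, t, rfl⟩
  subst_vars
  obtain ⟨b, cur, _⟩ : ∃ b t, cur = b :: t := by
    cases cur with | nil => simp at hlen | cons a t => exact ⟨a, t, rfl⟩
  subst_vars
  obtain ⟨c, cur, _⟩ : ∃ c t, cur = c :: t := by
    cases cur with | nil => simp at hlen | cons a t => exact ⟨a, t, rfl⟩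
  subst_vars
  interval_cases x <;>
    (simp_all [pvD, pvSub, pvAt, List.range_succ, List.filter] <;>
      by_cases h0 : (codon[0]?.getD ' ' = a) <;> by_cases h1 : (codon[1]?.getD ' ' = b) <;>
      by_cases h2 : (codon[2]?.getD ' ' = c) <;> simp_all [List.erase])

theorem flatMap_range_eraseIdx {β : Type} (F : Nat → List Nat → List β) (t : List Nat)
    (hn : t.Nodup) :
    (List.range t.length).flatMap (fun i => F (t.getD i 0) (t.eraseIdx i))
      = t.flatMap (fun x => F x (t.erase x)) := by
  induction t generalizing F with
  | nil => rfl
  | cons b s ih =>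
    have hb : b ∉ s := (List.nodup_cons.mp hn).1
    rw [List.length_cons, List.range_succ_eq_map, List.flatMap_cons, List.flatMap_map,
      List.flatMap_cons]
    have h2 := ih (fun x ys => F x (b :: ys)) (List.nodup_cons.mp hn).2
    simp only [Nat.succ_eq_add_one, List.getD_cons_succ, List.eraseIdx_cons_succ,
      List.eraseIdx_cons_zero, List.getD_cons_zero, List.erase_cons_head] at h2 ⊢
    rw [h2]
    congr 1
    apply List.flatMap_congr
    intro x hx
    rw [List.erase_cons_tail (by simp; rintro rfl; exact hb hx)]

theorem perms_decomp (l : List Nat) (hn : l.Nodup) (hne : l ≠ []) :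
    PySem.List.permutations l l.length
      = l.flatMap (fun x =>
          (PySem.List.permutations (l.erase x) (l.erase x).length).map (fun p => x :: p)) := by
  obtain ⟨a, t, rfl⟩ : ∃ a t, l = a :: t := by
    cases l with | nil => simp at hne | cons a t => exact ⟨a, t, rfl⟩
  rw [List.length_cons, PySem.List.permutations]
  refine Eq.trans (List.flatMap_congr (g := fun i =>
          (PySem.List.permutations ((a :: t).eraseIdx i) t.length).map
            (fun p => ((a :: t).getD i 0) :: p)) ?_) ?_
  · intro i hi
    have h : i < (a :: t).length := List.mem_range.mp hi
    simp [List.getElem?_eq_getElem h, List.getD_eq_getElem?_getD]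
  rw [flatMap_range_eraseIdx
    (fun x ys => (PySem.List.permutations ys t.length).map (fun p => x :: p)) (a :: t) hn]
  apply List.flatMap_congr
  intro x hx
  rw [List.length_erase_of_mem hx, List.length_cons]
  simp

theorem Ffull_eq_perms {codon cur : List Char} (hlen : 3 ≤ cur.length)
    (hne : pvD codon cur ≠ []) :
    (pvD codon cur).flatMap (fun x =>
        (PySem.List.permutations (pvD codon (pvSub cur x (pvAt codon x)))
            (pvD codon (pvSub cur x (pvAt codon x))).length).map (fun p => x :: p))
      = PySem.List.permutations (pvD codon cur) (pvD codon cur).length := by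
  rw [perms_decomp _ (nodup_pvD codon cur) hne]
  apply List.flatMap_congr
  intro x hx
  obtain ⟨hx3, hd⟩ := mem_pvD.mp hx
  rw [pvD_sub hx3 hlen hd]

theorem foldl_fix {α β : Type} {f : β → α → β} {l : List α} {b : β}
    (h : ∀ a ∈ l, ∀ b, f b a = b) : l.foldl f b = b := by
  induction l generalizing b with
  | nil => rfl
  | cons a t ih => rw [List.foldl_cons, h a (by simp), ih (fun a ha b => h a (by simp [ha]) b)]

theorem stepB_star {codon : List Char} {gc : PySem.Dict String String} {cur : List Char}
    {x : Nat} (hstar : pvLook gc (pvSub cur x (pvAt codon x)) = "*") (ls ln : Int)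
    (acc : Int × Int × Int) (σ : List Nat) :
    pvStepB codon gc cur ls ln acc (x :: σ) = acc := by
  simp [pvStepB, pvRunB, hstar]

theorem stepB_cons {codon : List Char} {gc : PySem.Dict String String} {cur : List Char}
    {x : Nat} (hstar : ¬ pvLook gc (pvSub cur x (pvAt codon x)) = "*") (ls ln : Int)
    (acc : Int × Int × Int) (σ : List Nat) :
    pvStepB codon gc cur ls ln acc (x :: σ) =
      pvStepB codon gc (pvSub cur x (pvAt codon x))
        ((if pvLook gc cur = pvLook gc (pvSub cur x (pvAt codon x)) then (ls + 1, ln) else (ls, ln + 1)).1)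
        ((if pvLook gc cur = pvLook gc (pvSub cur x (pvAt codon x)) then (ls + 1, ln) else (ls, ln + 1)).2)
        acc σ := by
  by_cases h : pvLook gc cur = pvLook gc (pvSub cur x (pvAt codon x)) <;>
    simp [pvStepB, pvRunB, hstar, h]

theorem mainA (codon : List Char) (gc : PySem.Dict String String) :
    ∀ (n : Nat) (cur : List Char) (xs : List Nat) (sd nd ls ln pc : Int),
      (pvD codon cur).length ≤ n → 3 ≤ cur.length → (∀ x ∈ xs, x < 3) →
      countA codon gc cur xs sd nd ls ln pc
        = ((xs.filter (fun x => pvAt codon x ≠ pvAt cur x)).flatMap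
             (fun x => (PySem.List.permutations (pvD codon (pvSub cur x (pvAt codon x)))
                          (pvD codon (pvSub cur x (pvAt codon x))).length).map
                        (fun p => x :: p))).foldl
            (pvStepB codon gc cur ls ln) (sd, nd, pc) := by
  intro n
  induction n using Nat.strong_induction_on with
  | _ n IH =>
  intro cur xs sd nd ls ln pc hn hlen hxs
  induction xs generalizing sd nd pc with
  | nil => rw [countA]; simp
  | cons x rest ihxs =>
    have hx3 : x < 3 := hxs x (by simp)
    have hxlen : x < cur.length := lt_of_lt_of_le hx3 hlen
    have hrest : ∀ y ∈ rest, y < 3 := fun y hy => hxs y (by simp [hy])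
    by_cases hd : pvAt codon x ≠ pvAt cur x
    · -- differing position
      have hDsub : pvD codon (pvSub cur x (pvAt codon x)) = (pvD codon cur).erase x :=
        pvD_sub hx3 hlen hd
      have hxmem : x ∈ pvD codon cur := mem_pvD.mpr ⟨hx3, hd⟩
      have hlt : (pvD codon (pvSub cur x (pvAt codon x))).length < (pvD codon cur).length := by
        rw [hDsub, List.length_erase_of_mem hxmem]
        have := List.length_pos_of_mem hxmem
        omega
      have hnwlen : 3 ≤ (pvSub cur x (pvAt codon x)).length := by
        rw [pvSub_length _ hxlen]; exact hlen
      rw [List.filter_cons_of_pos (by simpa using hd), List.flatMap_cons, List.foldl_append]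
      by_cases hstar : pvLook gc (pvSub cur x (pvAt codon x)) = "*"
      · -- stop codon: A skips the subtree, B's orderings through x all break at their first step
        rw [countA, if_pos hd, if_pos hstar, ihxs sd nd pc hrest,
          foldl_fix (l := (PySem.List.permutations (pvD codon (pvSub cur x (pvAt codon x)))
              (pvD codon (pvSub cur x (pvAt codon x))).length).map (fun p => x :: p))
            (by
              intro a ha b
              obtain ⟨σ, _, rfl⟩ := List.mem_map.mp ha
              exact stepB_star hstar ls ln b σ)]
      · -- not a stop codon
        by_cases hnc : pvSub cur x (pvAt codon x) = codon
        · -- this change reaches the target codon: one completed path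
          have hDnil : pvD codon (pvSub cur x (pvAt codon x)) = [] := by
            rw [hnc, pvD_self]
          rw [countA, if_pos hd, if_neg hstar,
            if_neg (show ¬(pvSub cur x (pvAt codon x) ≠ codon) from fun h => h hnc),
            ihxs _ _ _ hrest]
          congr 1
          rw [hDnil, show PySem.List.permutations ([] : List Nat) ([] : List Nat).length = [[]]
            from rfl]
          rw [hnc] at hstar
          by_cases hv : pvLook gc cur = pvLook gc codon <;>
            simp [pvStepB, pvRunB, hstar, hnc, hv]
        · -- intermediate codon: A recurses, B runs each ordering extended below x
          rw [countA, if_pos hd, if_neg hstar, if_pos hnc, dif_pos hlt, ihxs _ _ _ hrest]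
          congr 1
          have hrec := IH (pvD codon (pvSub cur x (pvAt codon x))).length
            (lt_of_lt_of_le hlt hn) (pvSub cur x (pvAt codon x)) [0, 1, 2] sd nd
            ((if pvLook gc cur = pvLook gc (pvSub cur x (pvAt codon x)) then (ls + 1, ln) else (ls, ln + 1)).1)
            ((if pvLook gc cur = pvLook gc (pvSub cur x (pvAt codon x)) then (ls + 1, ln) else (ls, ln + 1)).2)
            pc le_rfl hnwlen (by decide)
          rw [show (List.filter (fun y => decide (pvAt codon y ≠ pvAt (pvSub cur x (pvAt codon x)) y)) [0, 1, 2])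
              = pvD codon (pvSub cur x (pvAt codon x)) from rfl] at hrec
          rw [hrec, Prod.mk.eta, List.foldl_map,
            PySem.List.foldl_congr_mem _ _ _ _
              (fun acc σ _ => stepB_cons hstar ls ln acc σ)]
          by_cases hDe : pvD codon (pvSub cur x (pvAt codon x)) = []
          · rw [hDe]
            simp [pvStepB, pvRunB, hnc]
          · rw [← Ffull_eq_perms hnwlen hDe]
    · -- equal position: skipped by both programs
      simp only [ne_eq, not_not] at hd
      rw [countA, if_neg (show ¬(pvAt codon x ≠ pvAt cur x) from fun h => h hd),
        List.filter_cons_of_neg (by simp [hd]), ihxs sd nd pc hrest]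

-- ===== VERDICT (by name: the statement is the Claim_ definition above) =====
theorem countcodonchanges_spec : Claim_equal_countcodonchanges := by
  intro codon SNPcodon geneticcode sd nd loopsd loopnd pathcount _hdom hpre
  obtain ⟨hc, hs, -⟩ := hpre
  unfold Spec_countcodonchanges countcodonchanges countcodonchanges_alt
  rw [mainA codon.toList (PySem.Dict.ofList geneticcode)
    (pvD codon.toList SNPcodon.toList).length SNPcodon.toList [0, 1, 2]
    sd nd loopsd loopnd pathcount le_rfl hs (by decide)]
  rw [show (List.filter (fun y => decide (pvAt codon.toList y ≠ pvAt SNPcodon.toList y)) [0, 1, 2])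
      = pvD codon.toList SNPcodon.toList from rfl]
  by_cases hds : pvD codon.toList SNPcodon.toList = []
  · rw [hds]
    simp
    exact fun h => absurd hds h
  · rw [if_neg hds, Ffull_eq_perms hs hds]
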